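-- pv_equiv track=rewrite | github.com/NyroXTitan/Ciphers | ciphers.py | playfair_process
-- ===== SOURCE A (Python) =====
-- def playfair_process(text):
--     text = text.lower().replace('j', 'i').replace(' ', '')
--     pairs = []
--     i = 0
--     while i < len(text):
--         a = text[i]
--         b = text[i + 1] if i + 1 < len(text) else 'x'
--         if a == b:
--             pairs.append((a, 'x'))
--             i += 1
--         else:
--             pairs.append((a, b))
--             i += 2
--     return pairs
-- ===== SOURCE B (Python) =====
-- def playfair_process(text):
--     text = text.lower().replace('j', 'i').replace(' ', '')
--     pairs = []
--     pending = None
--     for c in text: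
--         if pending is None:
--             pending = c
--         elif pending == c:
--             pairs.append((pending, 'x'))
--             pending = c
--         else:
--             pairs.append((pending, c))
--             pending = None
--     if pending is not None:
--         pairs.append((pending, 'x'))
--     return pairs
-- ===== Notes on version B (the rewrite author's own statement) =====
-- stated objective: alternative
-- what changed: Replaced the index-based while loop (conditional lookahead text[i+1] and variable step 1 or 2) by a single for-loop over the characters keeping one pending-character variable, padding the final leftover after the loop.
import Mathlib
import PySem

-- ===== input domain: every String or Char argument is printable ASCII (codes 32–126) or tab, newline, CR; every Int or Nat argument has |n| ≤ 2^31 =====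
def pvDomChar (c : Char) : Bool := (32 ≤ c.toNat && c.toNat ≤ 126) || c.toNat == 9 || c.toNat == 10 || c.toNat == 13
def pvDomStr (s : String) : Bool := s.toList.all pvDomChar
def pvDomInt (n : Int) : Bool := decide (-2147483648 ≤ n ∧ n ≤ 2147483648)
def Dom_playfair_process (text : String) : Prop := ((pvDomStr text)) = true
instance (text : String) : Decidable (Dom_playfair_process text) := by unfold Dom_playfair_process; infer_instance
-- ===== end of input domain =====

-- B replaces A's index-based while loop (lookahead text[i+1], step 1 or 2) by one pass with a single
-- 'pending' variable, padding the leftover with 'x' after the loop; alternative decomposition, same cost.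

-- ===== PORT A =====
-- A's while loop: at index i, a = text[i], b = text[i+1] or 'x'; advance by 1 (on a == b) or 2.
-- Transcribed as recursion on the suffix text[i:] (the same state the index denotes).
def playfairLoopA : List Char → List (String × String)
  | [] => []
  | a :: rest =>
    let b := rest.headD 'x'
    if a == b then
      (String.ofList [a], "x") :: playfairLoopA rest
    else
      (String.ofList [a], String.ofList [b]) :: playfairLoopA rest.tail
termination_by cs => cs.length
decreasing_by
  all_goals cases rest <;> simp

def playfair_process (text : String) : List (String × String) :=
  let text := PySem.Str.replace (PySem.Str.replace (PySem.Str.lower text) "j" "i") " " ""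
  playfairLoopA text.toList

-- ===== PORT B =====
-- one step of B's for-loop: state = (pairs so far, pending)
def playfairStepB (st : List (String × String) × Option Char) (c : Char) :
    List (String × String) × Option Char :=
  match st.2 with
  | none => (st.1, some c)
  | some p =>
    if p == c then (st.1 ++ [(String.ofList [p], "x")], some c)
    else (st.1 ++ [(String.ofList [p], String.ofList [c])], none)

-- after the loop: pad the leftover pending with 'x'
def playfairFinishB (st : List (String × String) × Option Char) : List (String × String) :=
  match st.2 with
  | none => st.1
  | some p => st.1 ++ [(String.ofList [p], "x")]

def playfair_process_alt (text : String) : List (String × String) :=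
  let text := PySem.Str.replace (PySem.Str.replace (PySem.Str.lower text) "j" "i") " " ""
  playfairFinishB (text.toList.foldl playfairStepB ([], none))

-- ===== PRECONDITION & SPEC =====
def Spec_playfair_process (text : String) (out : List (String × String)) : Prop := out = playfair_process_alt text
instance (text : String) (out : List (String × String)) : Decidable (Spec_playfair_process text out) := by unfold Spec_playfair_process; infer_instance

-- ===== CLAIM (what is proved, stated in full; the proofs are below) =====
def Claim_equal_playfair_process : Prop := ∀ (text : String), Dom_playfair_process text → Spec_playfair_process text (playfair_process text)

-- ===== LEMMAS AND PROOFS =====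

-- the pending char, as the list of characters B still has to account for
def pendList : Option Char → List Char
  | none => []
  | some p => [p]

lemma playfairLoopA_single (a : Char) : playfairLoopA [a] = [(String.ofList [a], "x")] := by
  by_cases h : a = 'x' <;> simp [playfairLoopA, h]

-- invariant: running B's loop from state (pairs, pending) produces pairs ++ A's result on pending ++ cs
lemma loopB_eq_loopA (cs : List Char) :
    ∀ (pairs : List (String × String)) (pend : Option Char),
      playfairFinishB (cs.foldl playfairStepB (pairs, pend)) =
        pairs ++ playfairLoopA (pendList pend ++ cs) := by
  induction cs with
  | nil =>
    intro pairs pend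
    cases pend with
    | none => simp [playfairFinishB, pendList, playfairLoopA]
    | some p => simp [playfairFinishB, pendList, playfairLoopA_single]
  | cons c cs ih =>
    intro pairs pend
    cases pend with
    | none =>
      simpa [playfairStepB, pendList] using ih pairs (some c)
    | some p =>
      by_cases h : p = c
      · subst h
        simp only [List.foldl_cons, playfairStepB, beq_self_eq_true, if_true]
        rw [ih (pairs ++ [(String.ofList [p], "x")]) (some p)]
        simp [pendList, playfairLoopA]
      · simp only [List.foldl_cons, playfairStepB, beq_iff_eq, h, if_false]
        rw [ih (pairs ++ [(String.ofList [p], String.ofList [c])]) none]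
        simp [pendList, playfairLoopA, h]

-- ===== VERDICT (by name: the statement is the Claim_ definition above) =====
theorem playfair_process_spec : Claim_equal_playfair_process := by
  intro text _
  unfold Spec_playfair_process playfair_process playfair_process_alt
  rw [loopB_eq_loopA]
  simp [pendList]
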